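-- pv_equiv track=rewrite | github.com/assinscreedFC/OrthoLyse | app/models/transcription.py | custom_tokenize
-- ===== SOURCE A (Python) =====
-- def custom_tokenize(text):
--     # =============================================================================
--     # Auteur  : HAMMOUCHE Anis
--     # Email   : anis.hammouche@etu.u-paris.fr
--     # Version : 1.0
--     # =============================================================================
--     """
--     Tokenise un texte en séparant par espaces, puis combine les tokens qui sont issus
--     d'une division par apostrophe. Par exemple, "m'appeler" sera reconstruit en un seul token.
--
--     Arguments:
--         text (str): Le texte à tokeniser.
--
--     Retourne:
--         list: La liste des tokens.
--     """
--     tokens = text.split()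
--     combined_tokens = []
--     i = 0
--     while i < len(tokens):
--         token = tokens[i]
--         # Si le token suivant existe et commence par une apostrophe, on combine.
--         if i + 1 < len(tokens) and tokens[i + 1].startswith("'"):
--             combined_tokens.append(token + tokens[i + 1])
--             i += 2
--         else:
--             combined_tokens.append(token)
--             i += 1
--     return combined_tokens
-- ===== SOURCE B (Python) =====
-- def custom_tokenize(text):
--     out = []
--     just_merged = False
--     for token in text.split():
--         if token.startswith("'") and out and not just_merged:
--             out[-1] += token
--             just_merged = True
--         else:
--             out.append(token)
--             just_merged = False
--     return out
-- ===== Notes on version B (the rewrite author's own statement) =====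
-- stated objective: simpler
-- what changed: Replaces the index-pairing while-loop with +1/+2 jumps by a single forward for-loop that appends each token and merges an apostrophe-initial token into the previously emitted one, guarded by a just_merged flag.
import Mathlib
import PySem

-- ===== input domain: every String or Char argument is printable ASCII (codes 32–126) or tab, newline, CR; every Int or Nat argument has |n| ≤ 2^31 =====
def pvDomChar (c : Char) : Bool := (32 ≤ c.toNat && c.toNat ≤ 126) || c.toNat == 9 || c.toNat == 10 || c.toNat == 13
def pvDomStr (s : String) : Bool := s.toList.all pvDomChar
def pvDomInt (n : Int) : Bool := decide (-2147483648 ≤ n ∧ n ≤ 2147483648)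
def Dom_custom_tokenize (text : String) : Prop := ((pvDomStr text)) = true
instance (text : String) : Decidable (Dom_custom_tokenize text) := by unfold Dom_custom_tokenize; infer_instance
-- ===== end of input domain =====

-- B: single forward pass with a just_merged flag instead of A's index-pairing while-loop; same output, same cost.
-- ===== PORT A =====
-- the while-loop of A: index i over tokens, appending to combined_tokens (acc)
def pvLoopA (tokens : List String) (i : Nat) (acc : List String) : List String :=
  if _h : i < tokens.length then
    let token := tokens[i]!
    if i + 1 < tokens.length ∧ PySem.Str.startswith tokens[i+1]! "'" then
      pvLoopA tokens (i+2) (acc ++ [token ++ tokens[i+1]!])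
    else
      pvLoopA tokens (i+1) (acc ++ [token])
  else acc
termination_by tokens.length - i

def custom_tokenize (text : String) : List String :=
  pvLoopA (PySem.Str.split₀ text) 0 []

-- ===== PORT B =====
-- B's loop body: out kept reversed (head = last emitted token, Python's out[-1])
def pvStepB (st : List String × Bool) (token : String) : List String × Bool :=
  if PySem.Str.startswith token "'" ∧ st.1 ≠ [] ∧ st.2 = false then
    match st.1 with
    | last :: rest => ((last ++ token) :: rest, true)
    | [] => (st.1, st.2)   -- unreachable: st.1 ≠ []
  else (token :: st.1, false)

def custom_tokenize_alt (text : String) : List String :=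
  ((PySem.Str.split₀ text).foldl pvStepB ([], false)).1.reverse

-- ===== PRECONDITION & SPEC =====
def Spec_custom_tokenize (text : String) (out : List String) : Prop := out = custom_tokenize_alt text
instance (text : String) (out : List String) : Decidable (Spec_custom_tokenize text out) := by unfold Spec_custom_tokenize; infer_instance

-- ===== CLAIM (what is proved, stated in full; the proofs are below) =====
def Claim_equal_custom_tokenize : Prop := ∀ (text : String), Dom_custom_tokenize text → Spec_custom_tokenize text (custom_tokenize text)

-- ===== LEMMAS AND PROOFS =====

-- a structural characterisation both ports are reduced to
def pvPair : List String → List String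
  | [] => []
  | [t] => [t]
  | t :: u :: rest =>
    if PySem.Str.startswith u "'" then (t ++ u) :: pvPair rest
    else t :: pvPair (u :: rest)

theorem pvLoopA_eq (n : Nat) : ∀ (tokens : List String) (i : Nat) (acc : List String),
    tokens.length - i = n → pvLoopA tokens i acc = acc ++ pvPair (tokens.drop i) := by
  induction n using Nat.strong_induction_on with
  | _ n ih =>
    intro tokens i acc hn
    rw [pvLoopA]
    by_cases h : i < tokens.length
    · simp only [h, dif_pos]
      have hdrop : tokens.drop i = tokens[i]! :: tokens.drop (i+1) := by
        rw [getElem!_pos tokens i h]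
        exact (List.getElem_cons_drop h).symm
      by_cases h2 : i + 1 < tokens.length
      · have hdrop2 : tokens.drop (i+1) = tokens[i+1]! :: tokens.drop (i+2) := by
          rw [getElem!_pos tokens (i+1) h2]
          exact (List.getElem_cons_drop h2).symm
        by_cases hs : PySem.Str.startswith tokens[i+1]! "'"
        · rw [if_pos ⟨h2, hs⟩]
          rw [ih (tokens.length - (i+2)) (by omega) tokens (i+2) _ rfl]
          rw [hdrop, hdrop2, pvPair, if_pos hs]
          simp
        · rw [if_neg (by intro hc; exact hs hc.2)]
          rw [ih (tokens.length - (i+1)) (by omega) tokens (i+1) _ rfl]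
          rw [hdrop, hdrop2, pvPair, if_neg hs]
          simp
      · rw [if_neg (by intro hc; exact h2 hc.1)]
        rw [ih (tokens.length - (i+1)) (by omega) tokens (i+1) _ rfl]
        have hnil : tokens.drop (i+1) = [] := by
          apply List.drop_eq_nil_of_le; omega
        rw [hdrop, hnil, pvPair]
        simp [pvPair]
    · simp only [h, dif_neg, not_false_iff]
      have hnil : tokens.drop i = [] := by apply List.drop_eq_nil_of_le; omega
      rw [hnil, pvPair]; simp

theorem pvFoldB_eq : ∀ (ts : List String),
    (∀ acc, (ts.foldl pvStepB (acc, true)).1.reverse = acc.reverse ++ pvPair ts) ∧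
    (∀ h acc, (ts.foldl pvStepB (h :: acc, false)).1.reverse = acc.reverse ++ pvPair (h :: ts)) := by
  intro ts
  induction ts with
  | nil =>
    constructor
    · intro acc; simp [pvPair]
    · intro h acc; simp [pvPair]
  | cons t rest ih =>
    constructor
    · intro acc
      have hstep : pvStepB (acc, true) t = (t :: acc, false) := by
        unfold pvStepB
        rw [if_neg (by simp)]
      rw [List.foldl_cons, hstep, ih.2 t acc]
    · intro h acc
      by_cases hs : PySem.Str.startswith t "'"
      · have hstep : pvStepB (h :: acc, false) t = ((h ++ t) :: acc, true) := by
          unfold pvStepB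
          rw [if_pos ⟨hs, by simp, rfl⟩]
        rw [List.foldl_cons, hstep, ih.1 ((h ++ t) :: acc)]
        rw [show pvPair (h :: t :: rest) = (h ++ t) :: pvPair rest from by
          rw [pvPair, if_pos hs]]
        simp
      · have hstep : pvStepB (h :: acc, false) t = (t :: h :: acc, false) := by
          unfold pvStepB
          rw [if_neg (by intro hc; exact hs hc.1)]
        rw [List.foldl_cons, hstep, ih.2 t (h :: acc)]
        rw [show pvPair (h :: t :: rest) = h :: pvPair (t :: rest) from by
          rw [pvPair, if_neg hs]]
        simp

theorem custom_tokenize_alt_eq (text : String) :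
    custom_tokenize_alt text = pvPair (PySem.Str.split₀ text) := by
  unfold custom_tokenize_alt
  cases hts : PySem.Str.split₀ text with
  | nil => simp [pvPair]
  | cons h rest =>
    have hstep : pvStepB ([], false) h = ([h], false) := by
      simp [pvStepB]
    rw [List.foldl_cons, hstep, (pvFoldB_eq rest).2 h []]
    simp

-- ===== VERDICT (by name: the statement is the Claim_ definition above) =====
theorem custom_tokenize_spec : Claim_equal_custom_tokenize := by
  intro text _
  unfold Spec_custom_tokenize
  rw [custom_tokenize_alt_eq]
  unfold custom_tokenize
  rw [pvLoopA_eq _ _ 0 [] rfl]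
  simp
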